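-- pv_equiv track=rewrite | github.com/siddharthk004/Python_Programs | program15.py | nonFact
-- ===== SOURCE A (Python) =====
-- def nonFact(no1):
--     sum = 0
--     for i in range(1,no1):
--         if no1 % i == 0:
--             pass
--         else:
--             sum = sum + i
--     return sum
-- ===== SOURCE B (Python) =====
-- def nonFact(no1):
--     if no1 < 2:
--         return 0
--     total = (no1 - 1) * no1 // 2
--     dsum = 0
--     i = 1
--     while i * i <= no1:
--         if no1 % i == 0:
--             j = no1 // i
--             if i < no1:
--                 dsum += i
--             if j != i and j < no1:
--                 dsum += j
--         i += 1
--     return total - dsum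
-- ===== Notes on version B (the rewrite author's own statement) =====
-- stated objective: faster
-- what changed: Replaced A's linear scan of every candidate below n by the closed-form triangular sum minus the divisor sum computed in O(sqrt(n)) via divisor pairing (d, n//d).
import Mathlib
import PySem

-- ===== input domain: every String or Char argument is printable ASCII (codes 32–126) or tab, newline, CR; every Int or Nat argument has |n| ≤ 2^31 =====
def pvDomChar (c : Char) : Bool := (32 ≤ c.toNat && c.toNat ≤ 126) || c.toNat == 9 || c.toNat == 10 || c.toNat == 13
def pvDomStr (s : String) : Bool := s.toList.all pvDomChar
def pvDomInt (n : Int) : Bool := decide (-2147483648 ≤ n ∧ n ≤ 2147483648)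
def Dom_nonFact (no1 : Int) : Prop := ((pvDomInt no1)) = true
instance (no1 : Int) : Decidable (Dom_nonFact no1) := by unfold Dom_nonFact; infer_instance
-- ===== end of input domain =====

-- B replaces A's O(n) scan by the triangular closed form minus an O(√n) divisor-pairing loop.

-- ===== PORT A =====
def nonFact (no1 : Int) : Int :=
  (PySem.List.pyRange 1 no1 1).foldl
    (fun sum i => if PySem.Int.mod no1 i = 0 then sum else sum + i) 0

-- ===== PORT B =====
-- termination fact for the while loop: i ≤ i*i for every integer
theorem pv_le_sq (i : Int) : i ≤ i * i := by nlinarith [mul_self_nonneg (i - 1), mul_self_nonneg i]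

def nonFactLoop (no1 i dsum : Int) : Int :=
  if _h : i * i ≤ no1 then
    nonFactLoop no1 (i + 1)
      (if PySem.Int.mod no1 i = 0 then
        (let j := PySem.Int.floordiv no1 i
         let d1 := if i < no1 then dsum + i else dsum
         if j ≠ i ∧ j < no1 then d1 + j else d1)
       else dsum)
  else dsum
termination_by (no1 + 1 - i).toNat
decreasing_by
  have h2 : i ≤ i * i := pv_le_sq i
  omega

def nonFact_alt (no1 : Int) : Int :=
  if no1 < 2 then 0
  else PySem.Int.floordiv ((no1 - 1) * no1) 2 - nonFactLoop no1 1 0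

-- ===== PRECONDITION & SPEC =====
def Spec_nonFact (no1 : Int) (out : Int) : Prop := out = nonFact_alt no1
instance (no1 : Int) (out : Int) : Decidable (Spec_nonFact no1 out) := by unfold Spec_nonFact; infer_instance

-- ===== CLAIM (what is proved, stated in full; the proofs are below) =====
def Claim_equal_nonFact : Prop := ∀ (no1 : Int), Dom_nonFact no1 → Spec_nonFact no1 (nonFact no1)

-- ===== LEMMAS AND PROOFS =====

-- the body summed by B's while loop, over ℕ
def fB (n k : ℕ) : ℤ :=
  if k ∣ n then
    (if k < n then (k : ℤ) else 0) + (if n / k ≠ k ∧ n / k < n then ((n / k : ℕ) : ℤ) else 0)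
  else 0

-- A's fold is the sum of its per-element contributions
theorem foldA_eq (m : ℤ) (l : List ℤ) (s : ℤ) :
    l.foldl (fun sum i => if PySem.Int.mod m i = 0 then sum else sum + i) s
      = s + (l.map (fun i => if PySem.Int.mod m i = 0 then 0 else i)).sum := by
  induction l generalizing s with
  | nil => simp
  | cons a t ih =>
    simp only [List.foldl_cons, List.map_cons, List.sum_cons, ih]
    split <;> ring

theorem sum_map_range (f : ℕ → ℤ) (n : ℕ) :
    ((List.range n).map f).sum = ∑ i ∈ Finset.range n, f i := by
  induction n with
  | zero => simp
  | succ k ih => rw [List.range_succ, Finset.sum_range_succ]; simp [ih]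

-- A as a Finset sum, for positive n
theorem A_eq_sum (n : ℕ) (hn : 2 ≤ n) :
    nonFact (n : ℤ) = ∑ j ∈ Finset.Ico 1 n, (if j ∣ n then 0 else (j : ℤ)) := by
  unfold nonFact
  rw [PySem.List.pyRange_one, foldA_eq, zero_add, List.map_map, sum_map_range,
    Finset.sum_Ico_eq_sum_range]
  have hlen : ((n : ℤ) - 1).toNat = n - 1 := by omega
  rw [hlen]
  apply Finset.sum_congr rfl
  intro k _
  have hc1 : (1 : ℤ) + (k : ℤ) = ((1 + k : ℕ) : ℤ) := by push_cast; ring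
  simp only [Function.comp_apply, hc1, PySem.Int.mod_natCast, Nat.cast_eq_zero]
  have hd : n % (1 + k) = 0 ↔ (1 + k) ∣ n := by
    exact Nat.dvd_iff_mod_eq_zero.symm
  simp [hd]

-- B's loop as a Finset sum
theorem loop_stop (n k : ℕ) (hk : Nat.sqrt n < k) (d : ℤ) :
    nonFactLoop (n : ℤ) (k : ℤ) d = d + ∑ j ∈ Finset.Icc k (Nat.sqrt n), fB n j := by
  rw [nonFactLoop, dif_neg, Finset.Icc_eq_empty (by omega), Finset.sum_empty, add_zero]
  have hlt : n < k * k := Nat.sqrt_lt.mp hk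
  exact_mod_cast not_le.mpr (by exact_mod_cast hlt)

theorem loop_body (n k : ℕ) (d : ℤ) :
    (if PySem.Int.mod (n : ℤ) (k : ℤ) = 0 then
        (let j := PySem.Int.floordiv (n : ℤ) (k : ℤ)
         let d1 := if (k : ℤ) < (n : ℤ) then d + (k : ℤ) else d
         if j ≠ (k : ℤ) ∧ j < (n : ℤ) then d1 + j else d1)
      else d) = d + fB n k := by
  have hd : n % k = 0 ↔ k ∣ n := Nat.dvd_iff_mod_eq_zero.symm
  simp only [PySem.Int.mod_natCast, PySem.Int.floordiv_natCast, Nat.cast_eq_zero, hd,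
    Nat.cast_lt, ne_eq, Nat.cast_inj, fB]
  split_ifs <;> push_cast <;> ring

theorem loop_eq_aux (n : ℕ) : ∀ (m k : ℕ) (d : ℤ), 1 ≤ k →
    Nat.sqrt n + 1 - k ≤ m →
    nonFactLoop (n : ℤ) (k : ℤ) d = d + ∑ j ∈ Finset.Icc k (Nat.sqrt n), fB n j := by
  intro m
  induction m with
  | zero =>
    intro k d hk hm
    exact loop_stop n k (by omega) d
  | succ m ih =>
    intro k d hk hm
    by_cases hks : k ≤ Nat.sqrt n
    · have hkk : (k : ℤ) * (k : ℤ) ≤ (n : ℤ) := by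
        exact_mod_cast Nat.le_sqrt.mp hks
      rw [nonFactLoop, dif_pos hkk]
      have hc : (k : ℤ) + 1 = ((k + 1 : ℕ) : ℤ) := by push_cast; ring
      rw [loop_body n k d, hc, ih (k + 1) (d + fB n k) (by omega) (by omega)]
      have hins : Finset.Icc k (Nat.sqrt n) = insert k (Finset.Icc (k + 1) (Nat.sqrt n)) := by
        ext x
        simp only [Finset.mem_Icc, Finset.mem_insert]
        omega
      rw [hins, Finset.sum_insert (by simp only [Finset.mem_Icc]; omega)]
      ring
    · exact loop_stop n k (by omega) d

theorem loop_eq (n k : ℕ) (hk : 1 ≤ k) (d : ℤ) :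
    nonFactLoop (n : ℤ) (k : ℤ) d = d + ∑ j ∈ Finset.Icc k (Nat.sqrt n), fB n j :=
  loop_eq_aux n (Nat.sqrt n + 1 - k) k d hk le_rfl

-- the divisor pairing
theorem sum_fB (n : ℕ) (hn : 2 ≤ n) :
    ∑ j ∈ Finset.Icc 1 (Nat.sqrt n), fB n j
      = ∑ d ∈ Finset.filter (fun d => d ∣ n) (Finset.Ico 1 n), (d : ℤ) := by
  have hrn : Nat.sqrt n < n := Nat.sqrt_lt_self (by omega)
  have hrr : Nat.sqrt n * Nat.sqrt n ≤ n := Nat.sqrt_le n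
  have hsucc : n < (Nat.sqrt n + 1) * (Nat.sqrt n + 1) := Nat.lt_succ_sqrt n
  rw [← Finset.sum_filter_add_sum_filter_not
      (Finset.filter (fun d => d ∣ n) (Finset.Ico 1 n)) (fun d => d ≤ Nat.sqrt n)
      (fun d => (d : ℤ))]
  have hsplit : ∑ j ∈ Finset.Icc 1 (Nat.sqrt n), fB n j
      = (∑ j ∈ Finset.Icc 1 (Nat.sqrt n),
          if j ∣ n then (if j < n then (j : ℤ) else 0) else 0)
        + ∑ j ∈ Finset.Icc 1 (Nat.sqrt n),
            (if j ∣ n ∧ n / j ≠ j ∧ n / j < n then ((n / j : ℕ) : ℤ) else 0) := by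
    rw [← Finset.sum_add_distrib]
    apply Finset.sum_congr rfl
    intro j _
    unfold fB
    split_ifs <;> simp_all
  rw [hsplit]
  congr 1
  · -- small divisors
    have hset : Finset.filter (fun d => d ≤ Nat.sqrt n)
        (Finset.filter (fun d => d ∣ n) (Finset.Ico 1 n))
        = Finset.filter (fun j => j ∣ n) (Finset.Icc 1 (Nat.sqrt n)) := by
      ext d
      simp only [Finset.mem_filter, Finset.mem_Ico, Finset.mem_Icc]
      constructor
      · rintro ⟨⟨⟨h1, h2⟩, h3⟩, h4⟩; exact ⟨⟨h1, h4⟩, h3⟩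
      · rintro ⟨⟨h1, h2⟩, h3⟩; exact ⟨⟨⟨h1, by omega⟩, h3⟩, h2⟩
    rw [hset, Finset.sum_filter]
    apply Finset.sum_congr rfl
    intro j hj
    rw [Finset.mem_Icc] at hj
    have : j < n := by omega
    split_ifs <;> simp_all
  · -- large divisors, paired with n / j
    have hL : ∑ j ∈ Finset.Icc 1 (Nat.sqrt n),
        (if j ∣ n ∧ n / j ≠ j ∧ n / j < n then ((n / j : ℕ) : ℤ) else 0)
        = ∑ j ∈ Finset.filter (fun j => j ∣ n ∧ n / j ≠ j ∧ n / j < n)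
            (Finset.Icc 1 (Nat.sqrt n)), ((n / j : ℕ) : ℤ) := by
      rw [Finset.sum_filter]
    rw [hL]
    apply Finset.sum_nbij' (i := fun j => n / j) (j := fun d => n / d)
    · -- i maps s into t
      intro j hj
      rw [Finset.mem_filter, Finset.mem_Icc] at hj
      obtain ⟨⟨hj1, hj2⟩, hdvd, hne, hlt⟩ := hj
      obtain ⟨c, hc⟩ := hdvd
      have hj0 : 0 < j := by omega
      have hcq : n / j = c := by rw [hc, Nat.mul_div_cancel_left c hj0]
      have hc0 : 0 < c := by
        rcases Nat.eq_zero_or_pos c with h | h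
        · subst h; simp at hc; omega
        · exact h
      rw [hcq] at hne hlt
      rw [Finset.mem_filter, Finset.mem_filter, Finset.mem_Ico, hcq]
      refine ⟨⟨⟨by omega, by omega⟩, ⟨j, by rw [hc]; ring⟩⟩, ?_⟩
      -- ¬ n / j ≤ sqrt n
      intro hle
      have h1 : j * c ≤ Nat.sqrt n * c := Nat.mul_le_mul_right c hj2
      have h2 : Nat.sqrt n * c ≤ Nat.sqrt n * Nat.sqrt n := Nat.mul_le_mul_left _ hle
      have hj' : j = Nat.sqrt n := by nlinarith
      have hc' : c = Nat.sqrt n := by nlinarith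
      exact hne (by omega)
    · -- j maps t into s
      intro d hd
      rw [Finset.mem_filter, Finset.mem_filter, Finset.mem_Ico] at hd
      obtain ⟨⟨⟨hd1, hd2⟩, hdvd⟩, hgt⟩ := hd
      rw [not_le] at hgt
      obtain ⟨c, hc⟩ := hdvd
      have hd0 : 0 < d := by omega
      have hcq : n / d = c := by rw [hc, Nat.mul_div_cancel_left c hd0]
      have hc0 : 0 < c := by
        rcases Nat.eq_zero_or_pos c with h | h
        · subst h; simp at hc; omega
        · exact h
      have hcr : c ≤ Nat.sqrt n := by
        by_contra hcr
        rw [not_le] at hcr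
        have hdc : (Nat.sqrt n + 1) * (Nat.sqrt n + 1) ≤ d * c :=
          Nat.mul_le_mul (Nat.succ_le_of_lt hgt) (Nat.succ_le_of_lt hcr)
        have hnn : n < n := by
          calc n < (Nat.sqrt n + 1) * (Nat.sqrt n + 1) := hsucc
            _ ≤ d * c := hdc
            _ = n := hc.symm
        exact absurd hnn (lt_irrefl n)
      have hnc : n / c = d := by
        rw [hc, Nat.mul_comm d c, Nat.mul_div_cancel_left d hc0]
      rw [Finset.mem_filter, Finset.mem_Icc, hcq, hnc]
      exact ⟨⟨by omega, hcr⟩, ⟨d, by rw [hc]; ring⟩, by omega, by omega⟩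
    · -- left inverse
      intro j hj
      rw [Finset.mem_filter, Finset.mem_Icc] at hj
      obtain ⟨⟨hj1, _⟩, hdvd, _, _⟩ := hj
      obtain ⟨c, hc⟩ := hdvd
      have hj0 : 0 < j := by omega
      have hcq : n / j = c := by rw [hc, Nat.mul_div_cancel_left c hj0]
      have hc0 : 0 < c := by
        rcases Nat.eq_zero_or_pos c with h | h
        · subst h; simp at hc; omega
        · exact h
      rw [hcq, hc, Nat.mul_comm j c, Nat.mul_div_cancel_left j hc0]
    · -- right inverse
      intro d hd
      rw [Finset.mem_filter, Finset.mem_filter, Finset.mem_Ico] at hd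
      obtain ⟨⟨⟨hd1, _⟩, hdvd⟩, _⟩ := hd
      obtain ⟨c, hc⟩ := hdvd
      have hd0 : 0 < d := by omega
      have hcq : n / d = c := by rw [hc, Nat.mul_div_cancel_left c hd0]
      have hc0 : 0 < c := by
        rcases Nat.eq_zero_or_pos c with h | h
        · subst h; simp at hc; omega
        · exact h
      rw [hcq, hc, Nat.mul_comm d c, Nat.mul_div_cancel_left d hc0]
    · -- values agree
      intro j hj
      rfl

-- ===== VERDICT (by name: the statement is the Claim_ definition above) =====
theorem nonFact_spec : Claim_equal_nonFact := by
  intro no1 _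
  unfold Spec_nonFact nonFact_alt
  by_cases hlt : no1 < 2
  · rw [if_pos hlt]
    unfold nonFact
    rw [PySem.List.pyRange_one_eq_nil (by omega)]
    rfl
  · rw [if_neg hlt]
    rw [not_lt] at hlt
    obtain ⟨n, rfl⟩ : ∃ n : ℕ, no1 = (n : ℤ) := ⟨no1.toNat, by omega⟩
    have hn : 2 ≤ n := by exact_mod_cast hlt
    rw [A_eq_sum n hn]
    have hl := loop_eq n 1 le_rfl 0
    norm_num at hl
    rw [hl, sum_fB n hn]
    -- triangular closed form
    have htot : PySem.Int.floordiv (((n : ℤ) - 1) * n) 2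
        = ∑ j ∈ Finset.Ico 1 n, (j : ℤ) := by
      have hg : (∑ j ∈ Finset.Ico 1 n, (j : ℤ)) * 2 = ((n : ℤ) - 1) * n := by
        have h0 : ∑ j ∈ Finset.Ico 1 n, (j : ℤ) = ∑ j ∈ Finset.range n, (j : ℤ) := by
          rw [Finset.sum_Ico_eq_sum_range]
          obtain ⟨m, rfl⟩ : ∃ m, n = m + 1 := ⟨n - 1, by omega⟩
          rw [Finset.sum_range_succ']
          push_cast
          simp [add_comm]
        have h1 := Finset.sum_range_id_mul_two n
        have h2 : ((∑ j ∈ Finset.range n, j : ℕ) : ℤ) * 2 = ((n * (n - 1) : ℕ) : ℤ) := by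
          exact_mod_cast congrArg (Nat.cast : ℕ → ℤ) h1
        push_cast at h2
        rw [h0, h2]
        have h3 : ((n : ℤ) - 1) = ((n - 1 : ℕ) : ℤ) := by omega
        rw [h3]
        ring
      rw [PySem.Int.floordiv_eq_ediv_of_pos (by norm_num), ← hg]
      omega
    rw [htot]
    rw [Finset.sum_ite, Finset.sum_const_zero, zero_add]
    rw [eq_sub_iff_add_eq]
    rw [← Finset.sum_filter_add_sum_filter_not (Finset.Ico 1 n) (fun j => j ∣ n) (fun j => (j : ℤ))]
    ring
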